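-- pv_equiv track=rewrite | github.com/Yashsaini20/kranion | kranion_app_v2.py | remove_hit_spawns
-- ===== SOURCE A (Python) =====
-- def remove_hit_spawns(objectspawn_time,states_length_objectspawn,states_length_obstacleremoved):
--
--     length = 0
--     del_count = 0
--     for length1,length2 in zip(states_length_objectspawn,states_length_obstacleremoved):
--         diff = length1-length2
--         length += length1
--
--         if diff != 0 and length1 != 1:
--             del(objectspawn_time[length-del_count-1])
--             del_count += 1
--
--     return(objectspawn_time)
-- ===== SOURCE B (Python) =====
-- def remove_hit_spawns(objectspawn_time, states_length_objectspawn, states_length_obstacleremoved):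
--     # Mark the original index of each changed group in a set, then rebuild the
--     # list in one filtering pass (in place, via slice assignment): no deletions.
--     drop = set()
--     cum = 0
--     for length1, length2 in zip(states_length_objectspawn, states_length_obstacleremoved):
--         cum += length1
--         if length1 != length2 and length1 != 1:
--             drop.add(cum - 1)
--     objectspawn_time[:] = [x for i, x in enumerate(objectspawn_time) if i not in drop]
--     return objectspawn_time
-- ===== Notes on version B (the rewrite author's own statement) =====
-- stated objective: alternative
-- what changed: Replaced A's repeated in-place deletions with offset bookkeeping (del at length-del_count-1) by a set of original drop indices plus a single filtering rebuild over enumerate, assigned back via slice assignment.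
-- outside the precondition, e.g. on remove_hit_spawns([1, 2, 3], [2, 0], [0, 1]): A returns [3], B returns [1, 3]; on remove_hit_spawns([1, 2], [-1, 3], [0, 0]): A returns [], B returns [1]
import Mathlib
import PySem

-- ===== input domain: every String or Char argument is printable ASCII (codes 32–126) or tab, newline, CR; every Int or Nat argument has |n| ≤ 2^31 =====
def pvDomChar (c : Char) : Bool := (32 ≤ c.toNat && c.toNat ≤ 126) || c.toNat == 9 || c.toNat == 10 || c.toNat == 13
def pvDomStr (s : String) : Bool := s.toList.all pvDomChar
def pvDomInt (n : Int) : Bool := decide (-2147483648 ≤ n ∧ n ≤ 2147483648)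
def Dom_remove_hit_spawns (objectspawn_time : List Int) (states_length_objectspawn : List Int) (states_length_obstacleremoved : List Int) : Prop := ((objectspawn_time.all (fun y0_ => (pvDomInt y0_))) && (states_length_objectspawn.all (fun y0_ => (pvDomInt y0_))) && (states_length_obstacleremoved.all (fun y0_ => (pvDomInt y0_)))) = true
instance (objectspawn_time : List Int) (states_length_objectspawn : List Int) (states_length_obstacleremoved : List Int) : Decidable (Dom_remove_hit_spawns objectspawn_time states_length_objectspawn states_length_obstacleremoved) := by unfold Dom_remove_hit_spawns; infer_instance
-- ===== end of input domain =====

-- B replaces A's in-place offset-corrected deletions by a set of original drop indices plus one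
-- filtering rebuild pass over enumerate (objective: alternative, no deletions at all). Both Pythons mutate
-- the list argument in place (A by del, B by slice assignment); the equivalence proved here is
-- about the return value.

-- `del xs[i]` : Python deletion; when the index is out of range Python raises IndexError
-- (those inputs are outside Pre_ below) and the port keeps the list unchanged.
def pyDelStep (xs : List Int) (i : Int) : List Int :=
  match PySem.List.pop? xs i with
  | some (_, xs') => xs'
  | none => xs

-- ===== PORT A =====
def remove_hit_spawns (objectspawn_time : List Int) (states_length_objectspawn : List Int) (states_length_obstacleremoved : List Int) : List Int :=
  (List.foldl
    (fun (s : List Int × Int × Int) (p : Int × Int) =>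
      let diff := p.1 - p.2
      let length := s.2.1 + p.1
      if diff ≠ 0 ∧ p.1 ≠ 1 then
        (pyDelStep s.1 (length - s.2.2 - 1), length, s.2.2 + 1)
      else
        (s.1, length, s.2.2))
    (objectspawn_time, 0, 0)
    (states_length_objectspawn.zip states_length_obstacleremoved)).1

-- ===== PORT B =====
def remove_hit_spawns_alt (objectspawn_time : List Int) (states_length_objectspawn : List Int) (states_length_obstacleremoved : List Int) : List Int :=
  -- Pass 1: mark the original index of each changed group in a set.
  let drop :=
    (List.foldl
      (fun (s : PySem.Set Int × Int) (p : Int × Int) =>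
        let cum := s.2 + p.1
        if p.1 ≠ p.2 ∧ p.1 ≠ 1 then (PySem.Set.add s.1 (cum - 1), cum) else (s.1, cum))
      (PySem.Set.empty, 0)
      (states_length_objectspawn.zip states_length_obstacleremoved)).1
  -- Pass 2: rebuild by filtering enumerate(objectspawn_time) against the set.
  (PySem.List.enumerate objectspawn_time 0).filterMap
    (fun p => if PySem.Set.contains drop p.1 then none else some p.2)

-- ===== PRECONDITION & SPEC =====
-- The deletion positions determined by the inputs: for each changed group (length diff ≠ 0, group
-- length ≠ 1), the cumulative spawn count of the groups up to it, minus one.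
def dropIdxs (l1 l2 : List Int) : List Int :=
  ((List.range (min l1.length l2.length)).filter
     (fun k => decide (l1.getD k 0 - l2.getD k 0 ≠ 0 ∧ l1.getD k 0 ≠ 1))).map
   (fun k => (l1.take (k + 1)).sum - 1)

-- Pre_ is the natural domain: the deletion positions are strictly increasing and lie inside the
-- spawn list. Outside it A either raises IndexError or returns a value shaped by accidental
-- negative-index wraparound / duplicate cumulative deletion indices (see claim cites).
def Pre_remove_hit_spawns (objectspawn_time : List Int) (states_length_objectspawn : List Int) (states_length_obstacleremoved : List Int) : Prop :=
  (dropIdxs states_length_objectspawn states_length_obstacleremoved).Pairwise (· < ·) ∧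
  ∀ e ∈ dropIdxs states_length_objectspawn states_length_obstacleremoved,
    0 ≤ e ∧ e < (objectspawn_time.length : Int)
instance (objectspawn_time : List Int) (states_length_objectspawn : List Int) (states_length_obstacleremoved : List Int) : Decidable (Pre_remove_hit_spawns objectspawn_time states_length_objectspawn states_length_obstacleremoved) := by unfold Pre_remove_hit_spawns; infer_instance

def pvWitness_remove_hit_spawns : List Int × List Int × List Int := ([5, 6, 7], [2, 1], [0, 1])

def Spec_remove_hit_spawns (objectspawn_time : List Int) (states_length_objectspawn : List Int) (states_length_obstacleremoved : List Int) (out : List Int) : Prop := out = remove_hit_spawns_alt objectspawn_time states_length_objectspawn states_length_obstacleremoved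
instance (objectspawn_time : List Int) (states_length_objectspawn : List Int) (states_length_obstacleremoved : List Int) (out : List Int) : Decidable (Spec_remove_hit_spawns objectspawn_time states_length_objectspawn states_length_obstacleremoved out) := by unfold Spec_remove_hit_spawns; infer_instance

-- ===== CLAIM (what is proved, stated in full; the proofs are below) =====
def Claim_equal_remove_hit_spawns : Prop := ∀ (objectspawn_time : List Int) (states_length_objectspawn : List Int) (states_length_obstacleremoved : List Int), Dom_remove_hit_spawns objectspawn_time states_length_objectspawn states_length_obstacleremoved → Pre_remove_hit_spawns objectspawn_time states_length_objectspawn states_length_obstacleremoved → Spec_remove_hit_spawns objectspawn_time states_length_objectspawn states_length_obstacleremoved (remove_hit_spawns objectspawn_time states_length_objectspawn states_length_obstacleremoved)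

-- ===== LEMMAS AND PROOFS =====

-- pyDelStep on an in-range nonnegative index is eraseIdx.
lemma pyDelStep_in_range (xs : List Int) (i : Int) (h0 : 0 ≤ i) (h1 : i < (xs.length : Int)) :
    pyDelStep xs i = xs.eraseIdx i.toNat := by
  have hn : i.toNat < xs.length := by omega
  have : i = (i.toNat : Int) := by omega
  rw [pyDelStep, this, PySem.List.pop?_natCast xs i.toNat hn]
  simp only [Int.toNat_natCast]

lemma pyDelStep_out_of_range (xs : List Int) (i : Int) (h1 : (xs.length : Int) ≤ i) :
    pyDelStep xs i = xs := by
  have hidx : PySem.List.pyIdx? xs.length i = none := by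
    simp only [PySem.List.pyIdx?]
    split_ifs <;> first | rfl | omega
  rw [pyDelStep]
  simp [PySem.List.pop?, hidx]

lemma pyDelStep_zero_cons (x : Int) (xs : List Int) :
    pyDelStep (x :: xs) 0 = xs := by
  rw [pyDelStep_in_range (x :: xs) 0 le_rfl (by simp)]
  simp

lemma pyDelStep_cons_pos (x : Int) (xs : List Int) (k : Int) (hk : 1 ≤ k) :
    pyDelStep (x :: xs) k = x :: pyDelStep xs (k - 1) := by
  by_cases h : k < ((x :: xs).length : Int)
  · rw [pyDelStep_in_range (x :: xs) k (by omega) h,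
        pyDelStep_in_range xs (k - 1) (by omega) (by simp at h ⊢; omega)]
    obtain ⟨m, rfl⟩ : ∃ m : Nat, k = (m : Int) + 1 := ⟨(k - 1).toNat, by omega⟩
    have h1 : ((m : Int) + 1).toNat = m + 1 := by omega
    have h2 : ((m : Int) + 1 - 1).toNat = m := by omega
    rw [h1, h2, List.eraseIdx_cons_succ]
  · push Not at h
    rw [pyDelStep_out_of_range (x :: xs) k h,
        pyDelStep_out_of_range xs (k - 1) (by simp at h ⊢; omega)]

-- A's deletions, in foldr form: delete the listed indices from last to first.
def delDesc (xs : List Int) (l : List Int) : List Int :=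
  l.foldr (fun i ys => pyDelStep ys i) xs

lemma delDesc_cons (xs : List Int) (a : Int) (l : List Int) :
    delDesc xs (a :: l) = pyDelStep (delDesc xs l) a := rfl

-- The drop list determined by the inputs, as a structural recursion (for the proofs).
def dropsRec (c : Int) : List (Int × Int) → List Int
  | [] => []
  | p :: ps =>
      if p.1 - p.2 ≠ 0 ∧ p.1 ≠ 1 then (c + p.1 - 1) :: dropsRec (c + p.1) ps
      else dropsRec (c + p.1) ps

-- B's first pass builds exactly set(dropsRec).
lemma foldB_set_eq (ps : List (Int × Int)) : ∀ (s : PySem.Set Int) (c : Int),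
    (List.foldl
      (fun (s : PySem.Set Int × Int) (p : Int × Int) =>
        let cum := s.2 + p.1
        if p.1 ≠ p.2 ∧ p.1 ≠ 1 then (PySem.Set.add s.1 (cum - 1), cum) else (s.1, cum))
      (s, c) ps).1 = PySem.Set.update s (dropsRec c ps) := by
  induction ps with
  | nil => intro s c; simp [dropsRec, PySem.Set.update_nil]
  | cons p ps ih =>
    intro s c
    simp only [List.foldl_cons, dropsRec]
    by_cases h : p.1 - p.2 ≠ 0 ∧ p.1 ≠ 1
    · have h' : p.1 ≠ p.2 ∧ p.1 ≠ 1 := ⟨sub_ne_zero.mp h.1, h.2⟩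
      simp only [if_pos h, if_pos h', ih, PySem.Set.update_cons]
    · have h' : ¬ (p.1 ≠ p.2 ∧ p.1 ≠ 1) := by
        intro hc; exact h ⟨sub_ne_zero.mpr hc.1, hc.2⟩
      simp only [if_neg h, if_neg h', ih]

-- dropsRec is the comprehension dropIdxs, shifted by the running cumulative sum.
lemma dropsRec_eq_dropIdxs (l1 : List Int) : ∀ (l2 : List Int) (c : Int),
    dropsRec c (l1.zip l2)
      = ((List.range (min l1.length l2.length)).filter
           (fun k => decide (l1.getD k 0 - l2.getD k 0 ≠ 0 ∧ l1.getD k 0 ≠ 1))).map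
         (fun k => c + (l1.take (k + 1)).sum - 1) := by
  induction l1 with
  | nil => intro l2 c; simp [dropsRec]
  | cons a l1 ih =>
    intro l2 c
    cases l2 with
    | nil => simp [dropsRec]
    | cons b l2 =>
      have hmin : min (a :: l1).length (b :: l2).length = min l1.length l2.length + 1 := by
        simp [Nat.succ_min_succ]
      rw [List.zip_cons_cons, hmin, List.range_succ_eq_map, List.filter_cons, dropsRec]
      by_cases h : a - b ≠ 0 ∧ a ≠ 1
      · have h0 : ((a :: l1).getD 0 0 - (b :: l2).getD 0 0 ≠ 0 ∧ (a :: l1).getD 0 0 ≠ 1) := by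
          simpa only [List.getD_cons_zero] using h
        rw [if_pos h, if_pos (decide_eq_true h0), ih l2 (c + a)]
        simp only [List.map_cons, List.filter_map, List.map_map, Function.comp_def,
          List.getD_cons_succ, List.take_succ_cons, List.sum_cons, List.take_zero, List.sum_nil,
          add_zero]
        congr 1
        apply List.map_congr_left
        intro k _
        ring
      · have h0 : ¬ ((fun k => decide ((a :: l1).getD k 0 - (b :: l2).getD k 0 ≠ 0 ∧
            (a :: l1).getD k 0 ≠ 1)) 0 = true) := by
          simp only [decide_eq_true_eq, List.getD_cons_zero]
          exact h
        rw [if_neg h, if_neg h0, ih l2 (c + a)]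
        simp only [List.filter_map, List.map_map, Function.comp_def,
          List.getD_cons_succ, List.take_succ_cons, List.sum_cons]
        apply List.map_congr_left
        intro k _
        ring

lemma dropsRec_zero_eq_dropIdxs (l1 l2 : List Int) :
    dropsRec 0 (l1.zip l2) = dropIdxs l1 l2 := by
  rw [dropsRec_eq_dropIdxs, dropIdxs]
  apply List.map_congr_left
  intro k _
  ring

-- Nat-level commutation of two deletions, smaller index second vs first.
lemma eraseIdx_comm_nat (xs : List Int) (a e : Nat) (h : a < e) :
    (xs.eraseIdx e).eraseIdx a = (xs.eraseIdx a).eraseIdx (e - 1) := by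
  induction xs generalizing a e with
  | nil => simp
  | cons x xs ih =>
    cases a with
    | zero =>
      obtain ⟨e', rfl⟩ : ∃ e', e = e' + 1 := ⟨e - 1, by omega⟩
      simp [List.eraseIdx]
    | succ a' =>
      obtain ⟨e', rfl⟩ : ∃ e', e = e' + 1 := ⟨e - 1, by omega⟩
      have ha' : a' < e' := by omega
      simp only [List.eraseIdx_cons_succ, Nat.add_sub_cancel]
      obtain ⟨e'', rfl⟩ : ∃ e'', e' = e'' + 1 := ⟨e' - 1, by omega⟩
      simp only [List.eraseIdx_cons_succ]
      rw [ih a' (e'' + 1) ha']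
      simp

-- Int-level commutation: for 0 ≤ a < e, deleting e then a equals deleting a then e-1
-- (valid even when e is past the end: both extra deletions are no-ops).
lemma pyDelStep_comm (xs : List Int) (a e : Int) (h0 : 0 ≤ a) (h : a < e) :
    pyDelStep (pyDelStep xs e) a = pyDelStep (pyDelStep xs a) (e - 1) := by
  by_cases he : e < (xs.length : Int)
  · have h0e : 0 ≤ e := by omega
    have ha : a < (xs.length : Int) := by omega
    rw [pyDelStep_in_range xs e h0e he, pyDelStep_in_range xs a h0 ha]
    have hlen : ((xs.eraseIdx e.toNat).length : Int) = (xs.length : Int) - 1 := by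
      rw [List.length_eraseIdx_of_lt (by omega)]; omega
    have hlen' : ((xs.eraseIdx a.toNat).length : Int) = (xs.length : Int) - 1 := by
      rw [List.length_eraseIdx_of_lt (by omega)]; omega
    rw [pyDelStep_in_range _ a h0 (by omega), pyDelStep_in_range _ (e - 1) (by omega) (by omega)]
    have : (e - 1).toNat = e.toNat - 1 := by omega
    rw [this, eraseIdx_comm_nat xs a.toNat e.toNat (by omega)]
  · push Not at he
    rw [pyDelStep_out_of_range xs e he]
    by_cases ha : a < (xs.length : Int)
    · have : ((pyDelStep xs a).length : Int) = (xs.length : Int) - 1 := by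
        rw [pyDelStep_in_range xs a h0 ha, List.length_eraseIdx_of_lt (by omega)]; omega
      rw [pyDelStep_out_of_range (pyDelStep xs a) (e - 1) (by omega)]
    · push Not at ha
      rw [pyDelStep_out_of_range xs a ha, pyDelStep_out_of_range xs (e - 1) (by omega)]

-- Shift lemma used by main_inv: deleting an index smaller than everything in l first
-- shifts l down by one; here packaged as the delDesc equation.
lemma delDesc_shift_eq (a : Int) (l : List Int) (xs : List Int) (h0 : 0 ≤ a)
    (hlt : ∀ e ∈ l, a < e) :
    pyDelStep (delDesc xs l) a = delDesc (pyDelStep xs a) (l.map (· - 1)) := by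
  induction l generalizing xs with
  | nil => rfl
  | cons e l ih =>
    have hae : a < e := hlt e (List.mem_cons_self ..)
    calc pyDelStep (pyDelStep (delDesc xs l) e) a
        = pyDelStep (pyDelStep (delDesc xs l) a) (e - 1) := pyDelStep_comm _ a e h0 hae
      _ = pyDelStep (delDesc (pyDelStep xs a) (l.map (· - 1))) (e - 1) := by
            rw [ih xs (fun e' he' => hlt e' (List.mem_cons_of_mem _ he'))]
      _ = delDesc (pyDelStep xs a) ((e :: l).map (· - 1)) := rfl

-- A's fold deletes the drop indices, shifted by the count d of deletions already made,
-- from first to last — which equals deleting them (shifted) from last to first.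
lemma main_inv (ps : List (Int × Int)) : ∀ (xs : List Int) (c d : Int),
    0 ≤ d →
    (dropsRec c ps).Pairwise (· < ·) →
    (∀ e ∈ dropsRec c ps, d ≤ e ∧ e < (xs.length : Int) + d) →
    (List.foldl
      (fun (s : List Int × Int × Int) (p : Int × Int) =>
        let diff := p.1 - p.2
        let length := s.2.1 + p.1
        if diff ≠ 0 ∧ p.1 ≠ 1 then
          (pyDelStep s.1 (length - s.2.2 - 1), length, s.2.2 + 1)
        else
          (s.1, length, s.2.2))
      (xs, c, d) ps).1 = delDesc xs ((dropsRec c ps).map (· - d)) := by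
  induction ps with
  | nil => intro xs c d _ _ _; simp [dropsRec, delDesc]
  | cons p ps ih =>
    intro xs c d hd0 hpair hbnd
    simp only [List.foldl_cons, dropsRec]
    by_cases h : p.1 - p.2 ≠ 0 ∧ p.1 ≠ 1
    · simp only [if_pos h]
      rw [dropsRec] at hpair hbnd
      rw [if_pos h] at hpair hbnd
      have hhead := hbnd (c + p.1 - 1) (List.mem_cons_self ..)
      have hlt : ∀ e ∈ dropsRec (c + p.1) ps, c + p.1 - 1 < e :=
        (List.pairwise_cons.mp hpair).1
      have hpair' := (List.pairwise_cons.mp hpair).2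
      have ha0 : 0 ≤ c + p.1 - d - 1 := by omega
      have halen : c + p.1 - d - 1 < (xs.length : Int) := by omega
      have hxslen : ((pyDelStep xs (c + p.1 - d - 1)).length : Int) = (xs.length : Int) - 1 := by
        rw [pyDelStep_in_range xs _ ha0 halen, List.length_eraseIdx_of_lt (by omega)]
        omega
      rw [ih (pyDelStep xs (c + p.1 - d - 1)) (c + p.1) (d + 1) (by omega) hpair'
            (by
              intro e he
              have h1 := hlt e he
              have h2 := hbnd e (List.mem_cons_of_mem _ he)
              constructor <;> omega)]
      have hshift := delDesc_shift_eq (c + p.1 - d - 1) ((dropsRec (c + p.1) ps).map (· - d)) xs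
        ha0
        (by
          intro e he
          obtain ⟨e0, he0, rfl⟩ := List.mem_map.mp he
          have := hlt e0 he0
          omega)
      have hmm : ((dropsRec (c + p.1) ps).map (· - d)).map (· - 1)
          = (dropsRec (c + p.1) ps).map (· - (d + 1)) := by
        rw [List.map_map]; apply List.map_congr_left; intro x _; simp; omega
      rw [hmm] at hshift
      rw [← hshift]
      simp only [List.map_cons, delDesc_cons]
      congr 1
      omega
    · simp only [if_neg h]
      rw [dropsRec] at hpair hbnd
      rw [if_neg h] at hpair hbnd
      exact ih xs (c + p.1) d hd0 hpair hbnd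

-- B's rebuild pass, as a structural recursion over the list with an index counter.
def idxFilter (ds : List Int) : Int → List Int → List Int
  | _, [] => []
  | i, x :: xs => if i ∈ ds then idxFilter ds (i + 1) xs else x :: idxFilter ds (i + 1) xs

lemma idxFilter_nil (xs : List Int) : ∀ i : Int, idxFilter [] i xs = xs := by
  induction xs with
  | nil => intro i; rfl
  | cons x xs ih => intro i; simp [idxFilter, ih]

-- Filtering enumerate against a set is idxFilter on the set's element list.
lemma enum_filterMap_eq_idxFilter (ds : List Int) (xs : List Int) : ∀ i : Int,
    (PySem.List.enumerate xs i).filterMap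
      (fun p => if PySem.Set.contains ds p.1 then none else some p.2) = idxFilter ds i xs := by
  induction xs with
  | nil => intro i; simp [PySem.List.enumerate_nil, idxFilter]
  | cons x xs ih =>
    intro i
    rw [PySem.List.enumerate_cons, List.filterMap_cons, idxFilter]
    by_cases h : i ∈ ds
    · rw [if_pos h, if_pos (by simpa [PySem.Set.contains_iff] using h)]
      exact ih (i + 1)
    · rw [if_neg h, if_neg (by simpa [PySem.Set.contains_iff] using h)]
      rw [ih (i + 1)]

-- idxFilter only reads membership: equal-membership index lists filter alike.
lemma idxFilter_congr (ds ds' : List Int) (hmem : ∀ x, x ∈ ds ↔ x ∈ ds') (xs : List Int) :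
    ∀ i : Int, idxFilter ds i xs = idxFilter ds' i xs := by
  induction xs with
  | nil => intro i; rfl
  | cons x xs ih =>
    intro i
    rw [idxFilter, idxFilter]
    by_cases h : i ∈ ds
    · rw [if_pos h, if_pos ((hmem i).mp h), ih]
    · rw [if_neg h, if_neg (fun hc => h ((hmem i).mpr hc)), ih]

-- A head index smaller than every later index is absorbed once it is below the counter.
lemma idxFilter_head_lt (a : Int) (l : List Int) (xs : List Int) : ∀ j : Int, a < j →
    idxFilter (a :: l) j xs = idxFilter l j xs := by
  induction xs with
  | nil => intro j _; rfl
  | cons x xs ih =>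
    intro j hj
    rw [idxFilter, idxFilter]
    have : (j ∈ a :: l) ↔ j ∈ l := by
      simp only [List.mem_cons, or_iff_right_iff_imp]
      intro hja; omega
    by_cases h : j ∈ l
    · rw [if_pos h, if_pos (this.mpr h), ih (j + 1) (by omega)]
    · rw [if_neg h, if_neg (fun hc => h (this.mp hc)), ih (j + 1) (by omega)]

-- Deleting index a (a below every index of l) from the l-filtered list adds a to the filter.
lemma pyDelStep_idxFilter (a : Int) (l : List Int) (hlt : ∀ e ∈ l, a < e) (xs : List Int) :
    ∀ i : Int, i ≤ a → a - i < (xs.length : Int) →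
    pyDelStep (idxFilter l i xs) (a - i) = idxFilter (a :: l) i xs := by
  induction xs with
  | nil => intro i h1 h2; simp at h2; omega
  | cons x xs ih =>
    intro i h1 h2
    have hinl : i ∉ l := fun hc => by have := hlt i hc; omega
    rw [idxFilter, if_neg hinl, idxFilter]
    by_cases hia : i = a
    · subst hia
      have : i - i = 0 := by omega
      rw [this, pyDelStep_zero_cons, if_pos (List.mem_cons_self ..),
          idxFilter_head_lt i l xs (i + 1) (by omega)]
    · have hne : i ∉ a :: l := by
        simp only [List.mem_cons]
        push Not
        exact ⟨hia, hinl⟩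
      rw [if_neg hne, pyDelStep_cons_pos _ _ _ (by omega)]
      have : a - i - 1 = a - (i + 1) := by omega
      rw [this, ih (i + 1) (by omega) (by simp at h2 ⊢; omega)]

-- Deleting strictly increasing in-range indices from last to first is one filtering pass.
lemma delDesc_eq_idxFilter (ds : List Int) (xs : List Int)
    (hpair : ds.Pairwise (· < ·)) (hbnd : ∀ e ∈ ds, 0 ≤ e ∧ e < (xs.length : Int)) :
    delDesc xs ds = idxFilter ds 0 xs := by
  induction ds with
  | nil => rw [idxFilter_nil]; rfl
  | cons a l ih =>
    obtain ⟨hlt, hpair'⟩ := List.pairwise_cons.mp hpair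
    have ha := hbnd a (List.mem_cons_self ..)
    have step : delDesc xs (a :: l) = pyDelStep (delDesc xs l) a := rfl
    rw [step, ih hpair' (fun e he => hbnd e (List.mem_cons_of_mem _ he))]
    have := pyDelStep_idxFilter a l hlt xs 0 (by omega) (by omega)
    simpa using this

-- ===== VERDICT (by name: the statement is the Claim_ definition above) =====
theorem remove_hit_spawns_spec : Claim_equal_remove_hit_spawns := by
  intro ost l1 l2 _ hpre
  obtain ⟨hpair, hbnd⟩ := hpre
  rw [← dropsRec_zero_eq_dropIdxs l1 l2] at hpair hbnd
  unfold Spec_remove_hit_spawns remove_hit_spawns remove_hit_spawns_alt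
  -- B side: the set fold is set(dropsRec); the rebuild pass is idxFilter on dropsRec.
  rw [foldB_set_eq (l1.zip l2) PySem.Set.empty 0, PySem.Set.update_empty,
      enum_filterMap_eq_idxFilter,
      idxFilter_congr (PySem.Set.ofList (dropsRec 0 (l1.zip l2))) (dropsRec 0 (l1.zip l2))
        (fun x => PySem.Set.mem_ofList ..) ost 0]
  -- A side: the fused fold is delDesc of the (unshifted) drop list.
  rw [main_inv (l1.zip l2) ost 0 0 le_rfl hpair
        (by intro e he; have := hbnd e he; constructor <;> omega)]
  have hmap : (dropsRec 0 (l1.zip l2)).map (· - 0) = dropsRec 0 (l1.zip l2) := by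
    simp
  rw [hmap, delDesc_eq_idxFilter (dropsRec 0 (l1.zip l2)) ost hpair hbnd]
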